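-- pv_equiv track=rewrite | github.com/habenamare/algorithm-analysis-assignment | 01-arrays.py | is_hollow
-- ===== SOURCE A (Python) =====
-- def is_hollow(a, length):
--    if length < 3:
--       return False
--
--    no_of_elements_before_first_zero = 0
--    zero_count_ended = False
--    zero_count_ended_at_index = 0;
--
--    first_zero_found = False
--    no_of_zeros_found = 0
--
--    for i in range(0, length):
--       if a[i] != 0 and not first_zero_found:
--          no_of_elements_before_first_zero += 1
--       elif a[i] != 0 and (first_zero_found and not zero_count_ended):
--          zero_count_ended = True
--          zero_count_ended_at_index = i
--       elif zero_count_ended and a[i] == 0: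
--          return False
--       elif a[i] == 0:
--          if not first_zero_found:
--             first_zero_found = True
--
--          no_of_zeros_found += 1
--
--    # no_of_elements_after_last_zero = (length - zero_count_ended_at_index) if zero_count_ended else 0
--    no_of_elements_after_last_zero = 0
--    if zero_count_ended:
--       no_of_elements_after_last_zero = length - zero_count_ended_at_index
--
--    return no_of_zeros_found >= 3 and no_of_elements_before_first_zero == no_of_elements_after_last_zero
-- ===== SOURCE B (Python) =====
-- def is_hollow(a, length):
--     if length < 3:
--         return False
--     p = a[:length]
--     lead = 0
--     for x in p:
--         if x == 0:
--             break
--         lead += 1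
--     zeros = 0
--     for x in p[lead:]:
--         if x != 0:
--             break
--         zeros += 1
--     trail = p[lead + zeros:]
--     return zeros >= 3 and lead == len(trail) and all(x != 0 for x in trail)
-- ===== Notes on version B (the rewrite author's own statement) =====
-- stated objective: simpler
-- what changed: A's single pass with five pieces of mutable flag state (first_zero_found/zero_count_ended/ended-index bookkeeping) is replaced by a plain three-segment decomposition of the scanned prefix: count the leading nonzeros, count the following zero run, and check the remaining tail is all nonzero and as long as the lead.
-- outside the precondition, e.g. on is_hollow([0, 0, 0, 1, 0], 7): A returns False, B returns False; on is_hollow([1, 2, 3], 5): A raises IndexError, B returns False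
import Mathlib
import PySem

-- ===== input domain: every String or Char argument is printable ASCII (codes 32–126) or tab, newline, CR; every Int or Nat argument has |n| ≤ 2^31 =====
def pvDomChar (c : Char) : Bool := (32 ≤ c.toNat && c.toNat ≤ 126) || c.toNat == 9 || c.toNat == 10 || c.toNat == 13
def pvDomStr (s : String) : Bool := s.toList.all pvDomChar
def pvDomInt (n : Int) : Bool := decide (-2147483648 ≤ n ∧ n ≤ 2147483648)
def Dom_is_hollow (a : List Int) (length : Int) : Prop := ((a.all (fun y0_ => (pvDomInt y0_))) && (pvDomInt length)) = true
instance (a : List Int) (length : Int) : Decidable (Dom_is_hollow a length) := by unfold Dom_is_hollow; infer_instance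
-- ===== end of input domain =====

-- B replaces A's five-flag single state machine by a plain three-segment decomposition
-- (leading nonzeros / zero run / trailing rest) — simpler; return value only, no side effects.

-- ===== PORT A =====
-- the for-loop of A: state (before, ended, endedAt, first, zeros); early `return False` = false
def isHollowLoop (a : List Int) (length : Int) :
    List Int → Int → Bool → Int → Bool → Int → Bool
  | [], before, ended, endedAt, _first, zeros =>
      let after : Int := if ended then length - endedAt else 0
      decide (3 ≤ zeros) && decide (before = after)
  | i :: rest, before, ended, endedAt, first, zeros =>
      match PySem.List.pyGet? a i with
      | none => false   -- IndexError in Python: excluded by Pre_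
      | some v =>
        if v ≠ 0 ∧ first = false then
          isHollowLoop a length rest (before + 1) ended endedAt first zeros
        else if v ≠ 0 ∧ (first = true ∧ ended = false) then
          isHollowLoop a length rest before true i first zeros
        else if ended = true ∧ v = 0 then
          false
        else if v = 0 then
          isHollowLoop a length rest before ended endedAt true (zeros + 1)
        else
          isHollowLoop a length rest before ended endedAt first zeros

def is_hollow (a : List Int) (length : Int) : Bool :=
  if length < 3 then false
  else isHollowLoop a length (PySem.List.pyRange 0 length 1) 0 false 0 false 0

-- ===== PORT B =====
-- `for x in p: if x == 0: break; lead += 1`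
def leadFor : Int → List Int → Int
  | n, [] => n
  | n, x :: t => if x = 0 then n else leadFor (n + 1) t

-- `for x in p[lead:]: if x != 0: break; zeros += 1`
def zerosFor : Int → List Int → Int
  | n, [] => n
  | n, x :: t => if x ≠ 0 then n else zerosFor (n + 1) t

def is_hollow_alt (a : List Int) (length : Int) : Bool :=
  if length < 3 then false
  else
    let p := PySem.List.slice a none (some length)
    let lead := leadFor 0 p
    let zeros := zerosFor 0 (PySem.List.slice p (some lead) none)
    let trail := PySem.List.slice p (some (lead + zeros)) none
    decide (3 ≤ zeros) && decide (lead = (trail.length : Int)) && trail.all (fun x => x != 0)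

-- ===== PRECONDITION & SPEC =====
-- Pre_ excludes length > len(a) with length ≥ 3: there A's index loop runs past the array and
-- (except when an early non-contiguous-zero `return False` fires first) raises IndexError.
def Pre_is_hollow (a : List Int) (length : Int) : Prop :=
  length < 3 ∨ length ≤ (a.length : Int)
instance (a : List Int) (length : Int) : Decidable (Pre_is_hollow a length) := by
  unfold Pre_is_hollow; infer_instance

def pvWitness_is_hollow : List Int × Int := ([1, 0, 0, 0, 1], 5)

def Spec_is_hollow (a : List Int) (length : Int) (out : Bool) : Prop := out = is_hollow_alt a length
instance (a : List Int) (length : Int) (out : Bool) : Decidable (Spec_is_hollow a length out) := by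
  unfold Spec_is_hollow; infer_instance

-- ===== CLAIM (what is proved, stated in full; the proofs are below) =====
def Claim_equal_is_hollow : Prop :=
  ∀ (a : List Int) (length : Int), Dom_is_hollow a length → Pre_is_hollow a length →
    Spec_is_hollow a length (is_hollow a length)

-- ===== LEMMAS AND PROOFS =====

-- value-level mirror of A's loop: element list instead of indices; the running index i equals
-- length - (remaining.length), so `endedAt := i` becomes `length - (t.length + 1)`.
def loopV (length : Int) : List Int → Int → Bool → Int → Bool → Int → Bool
  | [], before, ended, endedAt, _first, zeros =>
      let after : Int := if ended then length - endedAt else 0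
      decide (3 ≤ zeros) && decide (before = after)
  | v :: t, before, ended, endedAt, first, zeros =>
      if v ≠ 0 ∧ first = false then
        loopV length t (before + 1) ended endedAt first zeros
      else if v ≠ 0 ∧ (first = true ∧ ended = false) then
        loopV length t before true (length - ((t.length : Int) + 1)) first zeros
      else if ended = true ∧ v = 0 then
        false
      else if v = 0 then
        loopV length t before ended endedAt true (zeros + 1)
      else
        loopV length t before ended endedAt first zeros

-- A's index loop computes loopV on the corresponding element list
lemma bridge (a : List Int) (length : Int) :
    ∀ (vs : List Int) (i before endedAt zeros : Int) (ended first : Bool),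
      0 ≤ i → i + (vs.length : Int) = length →
      (∀ j : Nat, (h : j < vs.length) → PySem.List.pyGet? a (i + (j : Int)) = some vs[j]) →
      isHollowLoop a length (PySem.List.pyRange i length 1) before ended endedAt first zeros
        = loopV length vs before ended endedAt first zeros := by
  intro vs
  induction vs with
  | nil =>
      intro i before endedAt zeros ended first hi hlen _hget
      simp only [List.length_nil, Int.natCast_zero, add_zero] at hlen
      rw [PySem.List.pyRange_one_eq_nil (le_of_eq hlen.symm)]
      rfl
  | cons v t ih =>
      intro i before endedAt zeros ended first hi hlen hget
      have hlt : i < length := by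
        simp only [List.length_cons] at hlen; push_cast at hlen; omega
      rw [PySem.List.pyRange_one_cons hlt]
      have h0 := hget 0 (by simp)
      simp only [Int.natCast_zero, add_zero, List.getElem_cons_zero] at h0
      have hrec : ∀ (b' eAt' z' : Int) (e' f' : Bool),
          isHollowLoop a length (PySem.List.pyRange (i + 1) length 1) b' e' eAt' f' z'
            = loopV length t b' e' eAt' f' z' := by
        intro b' eAt' z' e' f'
        apply ih
        · omega
        · simp only [List.length_cons] at hlen; push_cast at hlen ⊢; omega
        · intro j hj
          have := hget (j + 1) (by simpa using Nat.succ_lt_succ hj)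
          simpa [add_comm, add_assoc, add_left_comm] using this
      have hEnd : i = length - ((t.length : Int) + 1) := by
        simp only [List.length_cons] at hlen; push_cast at hlen ⊢; omega
      simp only [isHollowLoop, loopV, h0]
      split_ifs
      all_goals try rfl
      all_goals rw [hrec]
      all_goals try rw [hEnd]

-- phase 0: leading nonzeros are counted into `before`
lemma loopV_phase0 (len : Int) :
    ∀ (p : List Int) (b e z : Int),
      loopV len p b false e false z
        = loopV len (p.dropWhile (fun x => !(x == 0)))
            (b + ((p.takeWhile (fun x => !(x == 0))).length : Int)) false e false z := by
  intro p
  induction p with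
  | nil => intro b e z; simp
  | cons x t ih =>
      intro b e z
      by_cases hx : x = 0
      · subst hx; simp [loopV]
      · have hb : (x == 0) = false := by simp [hx]
        simp only [List.dropWhile_cons, List.takeWhile_cons, hb, Bool.not_false, if_true]
        simp only [loopV]
        rw [if_pos (show x ≠ 0 ∧ True from ⟨hx, trivial⟩), ih]
        congr 1
        push_cast [List.length_cons]; ring

-- entering the zero run sets `first` and counts the zero
lemma loopV_enter_zero (len : Int) (t : List Int) (b e z : Int) :
    loopV len (0 :: t) b false e false z = loopV len t b false e true (z + 1) := by
  simp [loopV]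

-- phase 1: the zero run is counted into `zeros`
lemma loopV_phase1 (len : Int) :
    ∀ (p : List Int) (b e z : Int),
      loopV len p b false e true z
        = loopV len (p.dropWhile (fun x => x == 0))
            b false e true (z + ((p.takeWhile (fun x => x == 0)).length : Int)) := by
  intro p
  induction p with
  | nil => intro b e z; simp
  | cons x t ih =>
      intro b e z
      by_cases hx : x = 0
      · subst hx
        simp only [List.dropWhile_cons, List.takeWhile_cons, beq_self_eq_true]
        simp only [loopV]
        norm_num
        rw [ih]
        congr 1
        push_cast [List.length_cons]; ring
      · have hb : (x == 0) = false := by simp [hx]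
        simp [loopV, hb, hx]

-- phase 2 (`ended` set): any further zero is fatal, otherwise the stored counts decide
lemma loopV_phase2 (len : Int) :
    ∀ (t : List Int) (b E z : Int),
      loopV len t b true E true z
        = (t.all (fun x => x != 0) && (decide (3 ≤ z) && decide (b = len - E))) := by
  intro t
  induction t with
  | nil => intro b E z; simp [loopV]
  | cons y t ih =>
      intro b E z
      by_cases hy : y = 0
      · simp [loopV, hy]
      · have hb : (y != 0) = true := by simp [hy]
        simp [loopV, hy, ih, hb]

-- B's for-loops compute takeWhile lengths
lemma leadFor_eq : ∀ (p : List Int) (n : Int),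
    leadFor n p = n + ((p.takeWhile (fun x => !(x == 0))).length : Int) := by
  intro p
  induction p with
  | nil => intro n; simp [leadFor]
  | cons x t ih =>
      intro n
      by_cases hx : x = 0
      · simp [leadFor, hx]
      · have hb : (x == 0) = false := by simp [hx]
        simp only [leadFor, List.takeWhile_cons, hb, Bool.not_false]
        rw [if_neg hx, ih]
        push_cast [List.length_cons]; ring

lemma zerosFor_eq : ∀ (p : List Int) (n : Int),
    zerosFor n p = n + ((p.takeWhile (fun x => x == 0)).length : Int) := by
  intro p
  induction p with
  | nil => intro n; simp [zerosFor]
  | cons x t ih =>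
      intro n
      by_cases hx : x = 0
      · subst hx
        simp only [zerosFor, List.takeWhile_cons, beq_self_eq_true]
        rw [if_neg (by simp : ¬((0 : Int) ≠ 0)), ih]
        push_cast [List.length_cons]; ring
      · have hb : (x == 0) = false := by simp [hx]
        simp [zerosFor, hx, hb]

lemma dropWhile_eq_drop_tw (p : List Int) (q : Int → Bool) :
    p.dropWhile q = p.drop (p.takeWhile q).length := by
  induction p with
  | nil => rfl
  | cons x t ih => by_cases h : q x <;> simp [List.dropWhile_cons, h, ih]

lemma head_dropWhile_false {p : List Int} {q : Int → Bool} {x : Int} {t : List Int}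
    (h : p.dropWhile q = x :: t) : q x = false := by
  have := List.head_dropWhile_not q (l := p) (by simp [h])
  simpa [h] using this

-- a list that has just been dropWhile'd no longer starts with an element satisfying the predicate
lemma takeWhile_dropWhile_nil (q : Int → Bool) (l : List Int) :
    (l.dropWhile q).takeWhile (fun x => q x) = [] := by
  induction l with
  | nil => rfl
  | cons x t ih =>
      by_cases h : q x
      · simpa [List.dropWhile_cons, h] using ih
      · simp [List.dropWhile_cons, h]

-- after the leading nonzeros: the remaining list starts with a zero (or is empty) and the
-- stored counts decide, matching B's last two segments
lemma loopV_tail_eq (len : Int) (r1 : List Int) (m : Nat)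
    (hhead : r1.takeWhile (fun x => !(x == 0)) = []) :
    loopV len r1 (m : Int) false 0 false 0
      = (decide (3 ≤ ((r1.takeWhile (fun x => x == 0)).length : Int))
         && decide ((m : Int) = ((r1.dropWhile (fun x => x == 0)).length : Int))
         && (r1.dropWhile (fun x => x == 0)).all (fun x => x != 0)) := by
  rcases r1 with _ | ⟨x0, t1⟩
  · simp [loopV]
  · have hx0 : x0 = 0 := by
      by_contra hne
      simp [hne] at hhead
    subst hx0
    have htw : ((0 : Int) :: t1).takeWhile (fun x => x == 0)
        = 0 :: t1.takeWhile (fun x => x == 0) := by simp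
    have hdw : ((0 : Int) :: t1).dropWhile (fun x => x == 0)
        = t1.dropWhile (fun x => x == 0) := by simp
    rw [htw, hdw, loopV_enter_zero, loopV_phase1]
    rcases hc2 : t1.dropWhile (fun x => x == 0) with _ | ⟨y, t2⟩
    · -- the zero run reaches the end of the scanned prefix
      simp only [loopV]
      rw [Bool.eq_iff_iff]
      simp [List.length_cons]
      omega
    · have hy : y ≠ 0 := by
        have := head_dropWhile_false hc2
        simpa using this
      have hystep : loopV len (y :: t2) (m : Int) false 0 true
            (0 + 1 + ((t1.takeWhile (fun x => x == 0)).length : Int))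
          = loopV len t2 (m : Int) true (len - ((t2.length : Int) + 1)) true
            (0 + 1 + ((t1.takeWhile (fun x => x == 0)).length : Int)) := by
        simp [loopV, hy]
      rw [hystep, loopV_phase2]
      have hball : (y != 0) = true := by simp [hy]
      rw [Bool.eq_iff_iff]
      simp [hball, List.length_cons]
      constructor <;> intro h
      · obtain ⟨h1', h2', h3'⟩ := h
        exact ⟨⟨by omega, by omega⟩, h1'⟩
      · obtain ⟨⟨h2', h3'⟩, h1'⟩ := h
        exact ⟨h1', by omega, by omega⟩

-- the core value-level equivalence, for the element list p of the scanned prefix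
lemma loopV_eq_segments (len : Int) (p : List Int) :
    loopV len p 0 false 0 false 0
      = (decide (3 ≤ zerosFor 0 (p.drop (leadFor 0 p).toNat))
         && decide (leadFor 0 p
              = ((p.drop (leadFor 0 p + zerosFor 0 (p.drop (leadFor 0 p).toNat)).toNat).length : Int))
         && (p.drop (leadFor 0 p + zerosFor 0 (p.drop (leadFor 0 p).toNat)).toNat).all
              (fun x => x != 0)) := by
  have h1 : leadFor 0 p = (((p.takeWhile (fun x => !(x == 0))).length : Nat) : Int) := by
    rw [leadFor_eq]; ring
  have h3 : p.drop (p.takeWhile (fun x => !(x == 0))).length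
      = p.dropWhile (fun x => !(x == 0)) := (dropWhile_eq_drop_tw p _).symm
  have h4 : zerosFor 0 (p.dropWhile (fun x => !(x == 0)))
      = ((((p.dropWhile (fun x => !(x == 0))).takeWhile (fun x => x == 0)).length : Nat) : Int) := by
    rw [zerosFor_eq]; ring
  have h6 : p.drop ((p.takeWhile (fun x => !(x == 0))).length
        + ((p.dropWhile (fun x => !(x == 0))).takeWhile (fun x => x == 0)).length)
      = (p.dropWhile (fun x => !(x == 0))).dropWhile (fun x => x == 0) := by
    rw [← List.drop_drop, h3, ← dropWhile_eq_drop_tw]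
  rw [h1]
  rw [show ((((p.takeWhile (fun x => !(x == 0))).length : Nat) : Int)).toNat
      = (p.takeWhile (fun x => !(x == 0))).length from Int.toNat_natCast _]
  rw [h3, h4]
  rw [show (((((p.takeWhile (fun x => !(x == 0))).length : Nat) : Int))
        + ((((p.dropWhile (fun x => !(x == 0))).takeWhile (fun x => x == 0)).length : Nat) : Int)).toNat
      = (p.takeWhile (fun x => !(x == 0))).length
        + ((p.dropWhile (fun x => !(x == 0))).takeWhile (fun x => x == 0)).length by omega]
  rw [h6]
  rw [loopV_phase0, zero_add]
  exact loopV_tail_eq len _ _ (takeWhile_dropWhile_nil _ p)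

-- ===== VERDICT (by name: the statement is the Claim_ definition above) =====
theorem is_hollow_spec : Claim_equal_is_hollow := by
  intro a length _hDom hPre
  unfold Spec_is_hollow
  by_cases hlen : length < 3
  · simp [is_hollow, is_hollow_alt, hlen]
  · have h3 : 3 ≤ length := by omega
    have hle : length ≤ (a.length : Int) := by
      rcases hPre with h | h
      · omega
      · exact h
    set p := a.take length.toNat with hp
    have hplen' : p.length = length.toNat := by
      simp [hp, List.length_take]; omega
    have hplen : (p.length : Int) = length := by rw [hplen']; omega
    have hA : is_hollow a length = loopV length p 0 false 0 false 0 := by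
      unfold is_hollow
      rw [if_neg hlen]
      apply bridge a length p 0
      · omega
      · simpa using hplen
      · intro j hj
        have hja : j < a.length := by
          rw [hplen'] at hj; omega
        rw [show ((0 : Int) + (j : Int)) = ((j : Nat) : Int) by ring,
          PySem.List.pyGet?_natCast]
        rw [List.getElem?_eq_getElem hja]
        congr 1
        simp [hp, List.getElem_take]
    have hlead0 : (0 : Int) ≤ leadFor 0 p := by rw [leadFor_eq]; simp
    have hz0 : (0 : Int) ≤ zerosFor 0 (p.drop (leadFor 0 p).toNat) := by
      rw [zerosFor_eq]; simp
    have hB : is_hollow_alt a length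
        = (decide (3 ≤ zerosFor 0 (p.drop (leadFor 0 p).toNat))
           && decide (leadFor 0 p
                = ((p.drop (leadFor 0 p + zerosFor 0 (p.drop (leadFor 0 p).toNat)).toNat).length : Int))
           && (p.drop (leadFor 0 p + zerosFor 0 (p.drop (leadFor 0 p).toNat)).toNat).all
                (fun x => x != 0)) := by
      have hslice : PySem.List.slice a none (some length) = p := by
        rw [PySem.List.slice_to a (by omega : (0 : Int) ≤ length)]
      unfold is_hollow_alt
      rw [if_neg hlen]
      simp only [hslice, PySem.List.slice_from p hlead0,
        PySem.List.slice_from p (by omega :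
          (0 : Int) ≤ leadFor 0 p + zerosFor 0 (p.drop (leadFor 0 p).toNat))]
    rw [hA, hB, loopV_eq_segments]
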